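-- pv_equiv track=rewrite | github.com/andieyw/git-testing-r1 | coding-practice/valid_parentheses.py | incorrect_is_valid
-- ===== SOURCE A (Python) =====
-- def incorrect_is_valid(s):
--     open=[]
--     open.append("(")
--     open.append("{")
--     open.append("[")
--
--     close=[]
--     close.append(")")
--     close.append("}")
--     close.append("]")
--
--     for i in range(len(s)-1):
--         if s[i] in open:
--             if s[i+1] in close:
--                 return True
--
--     return False
-- ===== SOURCE B (Python) =====
-- def incorrect_is_valid(s):
--     return any(o + c in s for o in "({[" for c in ")}]")
-- ===== Notes on version B (the rewrite author's own statement) =====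
-- stated objective: faster
-- what changed: Replaces the per-index loop with adjacent-character membership tests by substring-membership tests of the nine two-character opener-closer pairs in s.
import Mathlib
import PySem

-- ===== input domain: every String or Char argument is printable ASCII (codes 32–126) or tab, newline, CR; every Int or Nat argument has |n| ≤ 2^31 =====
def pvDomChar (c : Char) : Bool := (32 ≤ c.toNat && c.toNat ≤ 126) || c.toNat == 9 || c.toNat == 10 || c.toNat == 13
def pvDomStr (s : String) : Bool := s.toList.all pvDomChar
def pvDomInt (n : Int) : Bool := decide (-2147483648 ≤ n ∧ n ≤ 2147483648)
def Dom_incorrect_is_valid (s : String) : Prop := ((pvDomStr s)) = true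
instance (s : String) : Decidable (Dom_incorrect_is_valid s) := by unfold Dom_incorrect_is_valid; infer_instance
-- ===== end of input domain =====

-- B replaces A's index loop over adjacent positions with nine substring-membership
-- tests (one per opener-closer pair); objective: idiomatic, same exact behaviour.

-- ===== PORT A =====
-- for i in range(len(s)-1): if s[i] in open: if s[i+1] in close: return True / return False
def incorrect_is_valid (s : String) : Bool :=
  let opens : List Char := ['(', '{', '[']
  let closes : List Char := [')', '}', ']']
  (PySem.List.pyRange 0 (PySem.Str.len s - 1) 1).any fun i =>
    (match PySem.Str.pyGet? s i with
      | some a => opens.contains a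
      | none => false) &&
    (match PySem.Str.pyGet? s (i + 1) with
      | some b => closes.contains b
      | none => false)

-- ===== PORT B =====
-- any(o + c in s for o in "({[" for c in ")}]")
def incorrect_is_valid_alt (s : String) : Bool :=
  ['(', '{', '['].any fun o =>
    [')', '}', ']'].any fun c =>
      PySem.Str.isIn (String.ofList [o, c]) s

-- ===== PRECONDITION & SPEC =====
def Spec_incorrect_is_valid (s : String) (out : Bool) : Prop := out = incorrect_is_valid_alt s
instance (s : String) (out : Bool) : Decidable (Spec_incorrect_is_valid s out) := by unfold Spec_incorrect_is_valid; infer_instance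

-- ===== CLAIM (what is proved, stated in full; the proofs are below) =====
def Claim_equal_incorrect_is_valid : Prop := ∀ (s : String), Dom_incorrect_is_valid s → Spec_incorrect_is_valid s (incorrect_is_valid s)

-- ===== LEMMAS AND PROOFS =====

-- a two-element list is a prefix of l.drop j iff the two entries sit at j and j+1
theorem pair_prefix_drop_iff {α : Type} (a b : α) (l : List α) (j : ℕ) :
    [a, b] <+: l.drop j ↔ l[j]? = some a ∧ l[j + 1]? = some b := by
  constructor
  · rintro ⟨t, ht⟩
    have h0 : (l.drop j)[0]? = some a := by rw [← ht]; rfl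
    have h1 : (l.drop j)[1]? = some b := by rw [← ht]; rfl
    rw [List.getElem?_drop] at h0 h1
    simpa using And.intro h0 h1
  · rintro ⟨h0, h1⟩
    refine ⟨(l.drop j).drop 2, ?_⟩
    have hj : j < l.length := (List.getElem?_eq_some_iff.mp h0).1
    have hj1 : j + 1 < l.length := (List.getElem?_eq_some_iff.mp h1).1
    apply List.ext_getElem?
    intro k
    match k with
    | 0 => simp_all
    | 1 => simp_all
    | (k + 2) =>
        have he : j + (k + 2) = j + 2 + k := by omega
        simp [List.getElem?_drop, he]

theorem isIn_pair_iff (a b : Char) (s : String) :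
    PySem.Str.isIn (String.ofList [a, b]) s = true ↔
      ∃ j : ℕ, s.toList[j]? = some a ∧ s.toList[j + 1]? = some b := by
  rw [PySem.Str.isIn_iff_infix]
  simp only [String.toList_ofList]
  rw [← PySem.Chars.isIn_iff_infix, ← PySem.Chars.exists_prefix_drop_iff_isIn]
  exact exists_congr fun j => pair_prefix_drop_iff a b s.toList j

theorem incorrect_is_valid_iff (s : String) :
    incorrect_is_valid s = true ↔
      ∃ j : ℕ, (∃ a ∈ (['(', '{', '['] : List Char), s.toList[j]? = some a) ∧
               (∃ b ∈ ([')', '}', ']'] : List Char), s.toList[j + 1]? = some b) := by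
  unfold incorrect_is_valid
  rw [List.any_eq_true]
  constructor
  · rintro ⟨i, hmem, hp⟩
    have hi := (PySem.List.mem_pyRange_one).1 hmem
    obtain ⟨hi0, _⟩ := hi
    obtain ⟨j, rfl⟩ := Int.eq_ofNat_of_zero_le hi0
    simp only [Bool.and_eq_true] at hp
    obtain ⟨h1, h2⟩ := hp
    refine ⟨j, ?_, ?_⟩
    · rw [PySem.Str.pyGet?_natCast] at h1
      cases hg : s.toList[j]? with
      | none => rw [hg] at h1; exact absurd h1 (by simp)
      | some a =>
          rw [hg] at h1
          exact ⟨a, by simpa using h1, rfl⟩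
    · have he : ((j : ℤ) + 1) = ((j + 1 : ℕ) : ℤ) := by push_cast; ring
      rw [he, PySem.Str.pyGet?_natCast] at h2
      cases hg : s.toList[j + 1]? with
      | none => rw [hg] at h2; exact absurd h2 (by simp)
      | some b =>
          rw [hg] at h2
          exact ⟨b, by simpa using h2, rfl⟩
  · rintro ⟨j, ⟨a, ha, hja⟩, ⟨b, hb, hjb⟩⟩
    have hjlen : j + 1 < s.toList.length := (List.getElem?_eq_some_iff.mp hjb).1
    refine ⟨(j : ℤ), ?_, ?_⟩
    · rw [PySem.List.mem_pyRange_one]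
      constructor
      · positivity
      · have : (PySem.Str.len s) = (s.toList.length : ℤ) := by simp [PySem.Str.len_eq]
        rw [this]; omega
    · have h1 : ((j : ℤ) + 1) = ((j + 1 : ℕ) : ℤ) := by push_cast; ring
      rw [Bool.and_eq_true, PySem.Str.pyGet?_natCast, hja, h1, PySem.Str.pyGet?_natCast, hjb]
      constructor
      · fin_cases ha <;> rfl
      · fin_cases hb <;> rfl

theorem incorrect_is_valid_alt_iff (s : String) :
    incorrect_is_valid_alt s = true ↔
      ∃ a ∈ (['(', '{', '['] : List Char), ∃ b ∈ ([')', '}', ']'] : List Char),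
        ∃ j : ℕ, s.toList[j]? = some a ∧ s.toList[j + 1]? = some b := by
  unfold incorrect_is_valid_alt
  simp only [List.any_eq_true, isIn_pair_iff]

-- ===== VERDICT (by name: the statement is the Claim_ definition above) =====
theorem incorrect_is_valid_spec : Claim_equal_incorrect_is_valid := by
  intro s _
  unfold Spec_incorrect_is_valid
  cases hA : incorrect_is_valid s <;> cases hB : incorrect_is_valid_alt s
  · rfl
  · exfalso
    obtain ⟨a, ha, b, hb, j, hja, hjb⟩ := (incorrect_is_valid_alt_iff s).1 hB
    have := (incorrect_is_valid_iff s).2 ⟨j, ⟨a, ha, hja⟩, ⟨b, hb, hjb⟩⟩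
    rw [hA] at this; exact Bool.false_ne_true this
  · exfalso
    obtain ⟨j, ⟨a, ha, hja⟩, ⟨b, hb, hjb⟩⟩ := (incorrect_is_valid_iff s).1 hA
    have := (incorrect_is_valid_alt_iff s).2 ⟨a, ha, b, hb, j, hja, hjb⟩
    rw [hB] at this; exact Bool.false_ne_true this
  · rfl
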